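-- pv_equiv track=rewrite | github.com/AhmedMujtabaIBM/guardium-supported-datasources-v2 | consolidation-script2/Helpers/helpers.py | format_feature_a
-- ===== SOURCE A (Python) =====
-- def format_feature_a(key_,original_data):
--     for i in original_data:
--         if(len(key_) != len(i)):
--             raise(TypeError(f"{i} must be same length as {key_} "))
--     formatted_data = {}
--
--     for i in key_:
--         formatted_data[i] = set()
--
--     for entry in original_data:
--         for i,x in enumerate(key_):
--             formatted_data[x].add(entry[i])
--         # database_name, database_version, os_name, os_version = entry
--         # formatted_data['DatabaseName'].add(database_name)
--         # formatted_data['DatabaseVersion'].add(database_version)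
--         # formatted_data['OSName'].add(os_name)
--         # formatted_data['OSVersion'].add(os_version)
--     for i in key_:
--         formatted_data[i] = sorted(formatted_data[i])
--
--     return formatted_data
-- ===== SOURCE B (Python) =====
-- def format_feature_a(key_, original_data):
--     for i in original_data:
--         if(len(key_) != len(i)):
--             raise(TypeError(f"{i} must be same length as {key_} "))
--     cols = {}
--     for idx, k in enumerate(key_):
--         cols.setdefault(k, []).append(idx)
--     return {k: sorted({entry[i] for entry in original_data for i in idxs})
--             for k, idxs in cols.items()}
-- ===== Notes on version B (the rewrite author's own statement) =====
-- stated objective: alternative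
-- what changed: B groups column indices per key name once and builds the result column-by-column with a set/dict comprehension, instead of A's seeding empty sets and updating every bucket row-by-row.
import Mathlib
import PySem

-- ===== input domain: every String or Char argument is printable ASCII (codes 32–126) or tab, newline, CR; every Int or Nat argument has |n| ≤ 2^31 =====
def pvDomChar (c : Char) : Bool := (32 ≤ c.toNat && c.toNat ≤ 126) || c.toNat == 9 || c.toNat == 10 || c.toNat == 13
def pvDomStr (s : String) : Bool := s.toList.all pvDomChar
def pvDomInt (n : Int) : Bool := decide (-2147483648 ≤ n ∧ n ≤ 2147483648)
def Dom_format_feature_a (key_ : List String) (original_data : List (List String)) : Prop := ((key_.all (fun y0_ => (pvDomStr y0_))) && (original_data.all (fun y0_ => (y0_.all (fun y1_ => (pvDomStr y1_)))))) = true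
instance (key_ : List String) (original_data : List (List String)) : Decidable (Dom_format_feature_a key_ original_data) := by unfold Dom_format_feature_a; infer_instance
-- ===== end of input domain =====

-- B groups column indices per key once and reads values column-wise instead of A's row-major bucket updates; same return value on all inputs where A returns.


-- ===== PORT A =====
-- Row-major: seed every key with an empty set, add each entry's value to its key's
-- bucket, then sort each bucket.  The final Python loop reassigns each existing key
-- in place (insertion order kept), so it is the map over the dict's items.
-- Under Pre_ every entry[i] access is in range; pyGetD's default is never used there.
def format_feature_a (key_ : List String) (original_data : List (List String)) : List (String × List String) :=
  let d0 : PySem.Dict String (PySem.Set String) :=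
    key_.foldl (fun d k => d.insert k PySem.Set.empty) PySem.Dict.empty
  let d1 : PySem.Dict String (PySem.Set String) :=
    original_data.foldl (fun d entry =>
      (PySem.List.enumerate key_).foldl
        (fun d p => d.modify p.2 PySem.Set.empty
          (fun s => PySem.Set.add s (PySem.List.pyGetD entry p.1 ""))) d) d0
  d1.items.map (fun p => (p.1, PySem.List.sorted p.2 (fun x => x) false))

-- ===== PORT B =====
-- Column-major: group the column indices by key name once
-- ('cols.setdefault(k, []).append(idx)' is Dict.modify with default []), then for
-- each key sort the set of values read column-wise from all rows.
def format_feature_a_alt (key_ : List String) (original_data : List (List String)) : List (String × List String) :=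
  let cols : PySem.Dict String (List Int) :=
    (PySem.List.enumerate key_).foldl
      (fun d p => d.modify p.2 [] (fun l => l ++ [p.1])) PySem.Dict.empty
  cols.items.map (fun p =>
    (p.1, PySem.List.sorted
      (PySem.Set.ofList (original_data.flatMap
        (fun e => p.2.map (fun i => PySem.List.pyGetD e i ""))))
      (fun x => x) false))

-- ===== PRECONDITION & SPEC =====
-- Pre_ excludes exactly the inputs with a row whose length differs from key_'s length,
-- on which both A and B raise TypeError (the validation loop).
def Pre_format_feature_a (key_ : List String) (original_data : List (List String)) : Prop :=
  ∀ row ∈ original_data, row.length = key_.length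
instance (key_ : List String) (original_data : List (List String)) : Decidable (Pre_format_feature_a key_ original_data) := by unfold Pre_format_feature_a; infer_instance
def pvWitness_format_feature_a : List String × List (List String) :=
  (["DatabaseName", "OSName"], [["db2", "linux"], ["db2", "aix"], ["oracle", "linux"]])
def Spec_format_feature_a (key_ : List String) (original_data : List (List String)) (out : List (String × List String)) : Prop := out = format_feature_a_alt key_ original_data
instance (key_ : List String) (original_data : List (List String)) (out : List (String × List String)) : Decidable (Spec_format_feature_a key_ original_data out) := by unfold Spec_format_feature_a; infer_instance

-- ===== CLAIM (what is proved, stated in full; the proofs are below) =====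
def Claim_equal_format_feature_a : Prop := ∀ (key_ : List String) (original_data : List (List String)), Dom_format_feature_a key_ original_data → Pre_format_feature_a key_ original_data → Spec_format_feature_a key_ original_data (format_feature_a key_ original_data)

-- ===== LEMMAS AND PROOFS =====

-- adding an element already present leaves a set unchanged
theorem set_add_of_mem {s : PySem.Set String} {x : String} (h : x ∈ s) : PySem.Set.add s x = s := by
  simp [PySem.Set.add, PySem.Set.contains_eq_listContains, h]

-- updating a set with elements it already has leaves it unchanged
theorem set_update_of_subset (xs : List String) (s : PySem.Set String) (h : ∀ x ∈ xs, x ∈ s) :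
    PySem.Set.update s xs = s := by
  induction xs generalizing s with
  | nil => rfl
  | cons x xs ih =>
    have hc : PySem.Set.update s (x :: xs) = PySem.Set.update (PySem.Set.add s x) xs := rfl
    rw [hc, set_add_of_mem (h x (by simp))]
    exact ih s (fun y hy => h y (by simp [hy]))

theorem set_update_append (s : PySem.Set String) (a b : List String) :
    PySem.Set.update s (a ++ b) = PySem.Set.update (PySem.Set.update s a) b := by
  simp [PySem.Set.update, List.foldl_append]

theorem set_update_empty (xs : List String) :
    PySem.Set.update PySem.Set.empty xs = PySem.Set.ofList xs := rfl

-- A's seeding loop: every lookup is the empty set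
theorem d0_getD (l : List String) (d : PySem.Dict String (PySem.Set String)) (k : String)
    (h : d.getD k PySem.Set.empty = PySem.Set.empty) :
    ((l.foldl (fun d k => d.insert k PySem.Set.empty) d).getD k PySem.Set.empty) = PySem.Set.empty := by
  induction l generalizing d with
  | nil => exact h
  | cons x xs ih =>
    refine ih _ ?_
    rw [PySem.Dict.getD_insert]
    split
    · rfl
    · exact h

-- A's per-row loop: its effect at key k is adding that row's values at k's columns
theorem inner_getD (l : List (Int × String)) (d : PySem.Dict String (PySem.Set String))
    (e : List String) (k : String) :
    ((l.foldl (fun d p => d.modify p.2 PySem.Set.empty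
        (fun s => PySem.Set.add s (PySem.List.pyGetD e p.1 ""))) d).getD k PySem.Set.empty)
    = PySem.Set.update (d.getD k PySem.Set.empty)
        ((l.filter (fun p => p.2 == k)).map (fun p => PySem.List.pyGetD e p.1 "")) := by
  induction l generalizing d with
  | nil => rfl
  | cons p l ih =>
    rw [List.foldl_cons, ih, PySem.Dict.getD_modify]
    by_cases h : k = p.2
    · subst h
      simp only [List.filter_cons, beq_self_eq_true, if_pos, List.map_cons]
      rfl
    · have hb : (p.2 == k) = false := by simp [Ne.symm h]
      simp [h, hb]

-- A's data loop: its value at key k is the set of all values in k's columns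
theorem outer_getD (L : List (List String)) (key_ : List String)
    (d : PySem.Dict String (PySem.Set String)) (k : String) :
    ((L.foldl (fun d entry =>
        (PySem.List.enumerate key_).foldl (fun d p => d.modify p.2 PySem.Set.empty
          (fun s => PySem.Set.add s (PySem.List.pyGetD entry p.1 ""))) d) d).getD k PySem.Set.empty)
    = PySem.Set.update (d.getD k PySem.Set.empty)
        (L.flatMap (fun e => (((PySem.List.enumerate key_).filter (fun p => p.2 == k)).map
            (fun p => PySem.List.pyGetD e p.1 "")))) := by
  induction L generalizing d with
  | nil => rfl
  | cons e L ih =>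
    rw [List.foldl_cons, ih, inner_getD, List.flatMap_cons, set_update_append]

-- B's grouping loop: its value at key k is the list of k's column indices
theorem cols_getD (l : List (Int × String)) (d : PySem.Dict String (List Int)) (k : String) :
    ((l.foldl (fun d p => d.modify p.2 [] (fun l => l ++ [p.1])) d).getD k [])
    = d.getD k [] ++ ((l.filter (fun p => p.2 == k)).map (·.1)) := by
  induction l generalizing d with
  | nil => simp
  | cons p l ih =>
    rw [List.foldl_cons, ih, PySem.Dict.getD_modify]
    by_cases h : k = p.2
    · subst h
      simp
    · have hb : (p.2 == k) = false := by simp [Ne.symm h]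
      simp [h, hb]

theorem d0_keys (key_ : List String) :
    ((key_.foldl (fun (d : PySem.Dict String (PySem.Set String)) k => d.insert k PySem.Set.empty) PySem.Dict.empty).keys)
    = PySem.Set.ofList key_ := by
  rw [PySem.Dict.keys_foldl_insert, PySem.Dict.keys_empty]
  rfl

theorem d1_keys (L : List (List String)) (key_ : List String)
    (d : PySem.Dict String (PySem.Set String)) (h : d.keys = PySem.Set.ofList key_) :
    ((L.foldl (fun d entry =>
        (PySem.List.enumerate key_).foldl (fun d p => d.modify p.2 PySem.Set.empty
          (fun s => PySem.Set.add s (PySem.List.pyGetD entry p.1 ""))) d) d).keys)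
    = PySem.Set.ofList key_ := by
  induction L generalizing d with
  | nil => exact h
  | cons e L ih =>
    refine ih _ ?_
    rw [PySem.Dict.keys_foldl_modify_key, h, PySem.List.map_snd_enumerate]
    exact set_update_of_subset _ _ (fun x hx => by simpa [PySem.Set.mem_ofList] using hx)

theorem cols_keys (key_ : List String) :
    (((PySem.List.enumerate key_).foldl (fun (d : PySem.Dict String (List Int)) p => d.modify p.2 []
        (fun l => l ++ [p.1])) PySem.Dict.empty).keys) = PySem.Set.ofList key_ := by
  rw [PySem.Dict.keys_foldl_modify_key, PySem.Dict.keys_empty, PySem.List.map_snd_enumerate]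
  rfl

-- both results are maps over the same deduplicated key list with equal bodies
theorem ports_agree (key_ : List String) (original_data : List (List String)) :
    format_feature_a key_ original_data = format_feature_a_alt key_ original_data := by
  simp only [format_feature_a, format_feature_a_alt]
  rw [PySem.Dict.items_eq_map_keys _ (by rw [d1_keys _ _ _ (d0_keys key_)]; exact PySem.Set.nodup_ofList _) PySem.Set.empty,
      PySem.Dict.items_eq_map_keys _ (by rw [cols_keys]; exact PySem.Set.nodup_ofList _) ([] : List Int),
      d1_keys _ _ _ (d0_keys key_), cols_keys, List.map_map, List.map_map]
  refine List.map_congr_left (fun k _ => ?_)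
  simp only [Function.comp]
  rw [outer_getD, d0_getD _ _ _ (by rw [PySem.Dict.getD_empty]), cols_getD, PySem.Dict.getD_empty,
      set_update_empty]
  simp [List.map_map, Function.comp_def]

-- ===== VERDICT (by name: the statement is the Claim_ definition above) =====
theorem format_feature_a_spec : Claim_equal_format_feature_a := by
  intro key_ original_data _ _
  unfold Spec_format_feature_a
  exact ports_agree key_ original_data
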